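-- pv_equiv track=rewrite | github.com/Anubhab-1/insight-ai-hackathon | backend/main.py | choose_preferred_metric
-- ===== SOURCE A (Python) =====
-- from typing import List, Optional, Dict, Any, Tuple, Callable, cast
--
-- def choose_preferred_metric(numeric_columns: List[str]) -> str:
--     priority_tokens = [
--         "revenue",
--         "sales",
--         "profit",
--         "amount",
--         "value",
--         "views",
--         "watch",
--         "engagement",
--         "likes",
--         "comments",
--         "shares",
--         "count",
--         "score",
--     ]
--
--     for token in priority_tokens:
--         for column in numeric_columns:
--             if token in column.lower():
--                 return column
--
--     return numeric_columns[0] if numeric_columns else "value"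
-- ===== SOURCE B (Python) =====
-- from typing import List
--
--
-- def choose_preferred_metric(numeric_columns: List[str]) -> str:
--     priority_tokens = [
--         "revenue",
--         "sales",
--         "profit",
--         "amount",
--         "value",
--         "views",
--         "watch",
--         "engagement",
--         "likes",
--         "comments",
--         "shares",
--         "count",
--         "score",
--     ]
--
--     def key(column: str) -> int:
--         low = column.lower()
--         return next((i for i, t in enumerate(priority_tokens) if t in low),
--                     len(priority_tokens))
--
--     return min(numeric_columns, key=key, default="value")
-- ===== Notes on version B (the rewrite author's own statement) =====
-- stated objective: idiomatic
-- what changed: Replaced A's token-major nested loops (scan all columns once per priority token) by a single stable min-by pass over the columns, keyed by each column's best (lowest) matching token rank, with default='value' covering the empty case.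
import Mathlib
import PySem

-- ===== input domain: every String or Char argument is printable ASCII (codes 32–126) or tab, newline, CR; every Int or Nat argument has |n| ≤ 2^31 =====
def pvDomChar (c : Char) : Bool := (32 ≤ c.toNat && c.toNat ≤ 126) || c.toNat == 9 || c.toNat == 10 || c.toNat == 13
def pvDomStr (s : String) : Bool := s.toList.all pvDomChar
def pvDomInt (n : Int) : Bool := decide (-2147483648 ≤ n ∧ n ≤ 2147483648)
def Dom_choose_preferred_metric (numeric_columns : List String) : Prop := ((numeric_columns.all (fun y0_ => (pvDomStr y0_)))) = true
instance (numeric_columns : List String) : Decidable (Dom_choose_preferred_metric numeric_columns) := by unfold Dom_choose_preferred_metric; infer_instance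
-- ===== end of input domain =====

-- B replaces A's token-major nested loops by one stable min-by-token-rank pass over the columns (idiomatic; same cost).

-- the fixed priority list, shared verbatim by both Pythons
def pvTokens : List String :=
  ["revenue", "sales", "profit", "amount", "value", "views", "watch",
   "engagement", "likes", "comments", "shares", "count", "score"]

-- ===== PORT A =====
-- 'for token in …: for column in …: if token in column.lower(): return column'
def choose_preferred_metric (numeric_columns : List String) : String :=
  match pvTokens.findSome? (fun token =>
      numeric_columns.find? (fun column => PySem.Str.isIn token (PySem.Str.lower column))) with
  | some column => column
  | none =>
    -- 'return numeric_columns[0] if numeric_columns else "value"'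
    match numeric_columns with
    | column :: _ => column
    | [] => "value"

-- ===== PORT B =====
-- 'next((i for i, t in enumerate(priority_tokens) if t in low), len(priority_tokens))'
def pvKey (column : String) : Int :=
  let low := PySem.Str.lower column
  ((PySem.List.enumerate pvTokens 0).findSome? (fun p =>
      if PySem.Str.isIn p.2 low then some p.1 else none)).getD ((pvTokens.length : Int))

-- 'return min(numeric_columns, key=key, default="value")'
def choose_preferred_metric_alt (numeric_columns : List String) : String :=
  PySem.List.minD numeric_columns pvKey "value"

-- ===== PRECONDITION & SPEC =====
def Spec_choose_preferred_metric (numeric_columns : List String) (out : String) : Prop := out = choose_preferred_metric_alt numeric_columns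
instance (numeric_columns : List String) (out : String) : Decidable (Spec_choose_preferred_metric numeric_columns out) := by unfold Spec_choose_preferred_metric; infer_instance

-- ===== CLAIM (what is proved, stated in full; the proofs are below) =====
def Claim_equal_choose_preferred_metric : Prop := ∀ (numeric_columns : List String), Dom_choose_preferred_metric numeric_columns → Spec_choose_preferred_metric numeric_columns (choose_preferred_metric numeric_columns)

-- ===== LEMMAS AND PROOFS =====

-- B's key, generalized to an arbitrary token list and start rank (proof helper)
def pvKeyG (toks : List String) (s : Int) (c : String) : Int :=
  ((PySem.List.enumerate toks s).findSome? (fun p =>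
      if PySem.Str.isIn p.2 (PySem.Str.lower c) then some p.1 else none)).getD (s + (toks.length : Int))

-- the fold step of PySem.List.min?
def pvStep (key : String → Int) (acc : Option String) (x : String) : Option String :=
  match acc with
  | none => some x
  | some m => if key x < key m then some x else some m

theorem pvMin?_eq_foldl (xs : List String) (key : String → Int) :
    PySem.List.min? xs key = xs.foldl (pvStep key) none := by
  unfold PySem.List.min?
  congr 1
  funext acc x
  cases acc <;> rfl

theorem pvKey_eq_keyG (c : String) : pvKey c = pvKeyG pvTokens 0 c := by
  simp [pvKey, pvKeyG]

theorem pvKeyG_lb (toks : List String) (s : Int) (c : String) : s ≤ pvKeyG toks s c := by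
  unfold pvKeyG
  cases h : (PySem.List.enumerate toks s).findSome? (fun p =>
      if PySem.Str.isIn p.2 (PySem.Str.lower c) then some p.1 else none) with
  | none => simp
  | some i =>
    obtain ⟨p, hp, hfp⟩ := List.exists_of_findSome?_eq_some h
    rw [PySem.List.mem_enumerate_iff] at hp
    obtain ⟨k, hk, rfl⟩ := hp
    by_cases hm : PySem.Str.isIn toks[k] (PySem.Str.lower c) = true <;> simp at hfp
    · obtain ⟨-, hfp⟩ := hfp
      subst hfp; simp
    · simp at hm
      exact absurd hfp.1 (by simpa using hm)

theorem pvKeyG_cons (t : String) (ts : List String) (s : Int) (c : String) :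
    pvKeyG (t :: ts) s c =
      if PySem.Str.isIn t (PySem.Str.lower c) then s else pvKeyG ts (s + 1) c := by
  unfold pvKeyG
  rw [PySem.List.enumerate_cons, List.findSome?_cons]
  cases hm : PySem.Str.isIn t (PySem.Str.lower c) with
  | true => simp only [if_true, Option.getD_some]
  | false =>
    congr 1
    simp only [List.length_cons]
    push_cast
    ring

theorem pvFoldl_stay (key : String → Int) (xs : List String) (m : String)
    (h : ∀ x ∈ xs, ¬ key x < key m) : xs.foldl (pvStep key) (some m) = some m := by
  induction xs with
  | nil => rfl
  | cons x t ih =>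
    have hx := h x (by simp)
    simp only [List.foldl_cons, pvStep, if_neg hx]
    exact ih (fun y hy => h y (by simp [hy]))

theorem pvFoldl_first (key : String → Int) (p : String → Bool) (lo : Int) (c₀ : String) :
    ∀ (xs : List String) (m : String),
    (∀ y ∈ xs, lo ≤ key y) → (∀ y ∈ xs, p y = true ↔ key y = lo) → lo < key m →
    xs.find? p = some c₀ → xs.foldl (pvStep key) (some m) = some c₀ := by
  intro xs
  induction xs with
  | nil => intro m _ _ _ hf; simp at hf
  | cons x t ih =>
    intro m h1 h2 hm hf
    rw [List.find?_cons] at hf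
    by_cases hp : p x = true
    · simp only [hp] at hf
      injection hf with hf; subst hf
      have hx0 : key x = lo := (h2 x (by simp)).mp hp
      simp only [List.foldl_cons, pvStep, hx0, if_pos hm]
      exact pvFoldl_stay key t x (fun y hy => by
        have := h1 y (by simp [hy]); rw [hx0]; omega)
    · simp only [hp] at hf
      have hxlo : lo < key x := by
        have h1x := h1 x (by simp)
        have : ¬ key x = lo := fun he => hp ((h2 x (by simp)).mpr he)
        omega
      simp only [List.foldl_cons, pvStep]
      by_cases hc : key x < key m
      · rw [if_pos hc]
        exact ih x (fun y hy => h1 y (by simp [hy])) (fun y hy => h2 y (by simp [hy])) hxlo hf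
      · rw [if_neg hc]
        exact ih m (fun y hy => h1 y (by simp [hy])) (fun y hy => h2 y (by simp [hy])) hm hf

theorem pvMin?_first (key : String → Int) (p : String → Bool) (lo : Int) (c₀ : String)
    (xs : List String)
    (h1 : ∀ y ∈ xs, lo ≤ key y) (h2 : ∀ y ∈ xs, p y = true ↔ key y = lo)
    (hf : xs.find? p = some c₀) : PySem.List.min? xs key = some c₀ := by
  rw [pvMin?_eq_foldl]
  cases xs with
  | nil => simp at hf
  | cons x t =>
    rw [List.find?_cons] at hf
    simp only [List.foldl_cons, pvStep]
    by_cases hp : p x = true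
    · simp only [hp] at hf
      injection hf with hf; subst hf
      have hx0 : key x = lo := (h2 x (by simp)).mp hp
      exact pvFoldl_stay key t x (fun y hy => by
        have := h1 y (by simp [hy]); rw [hx0]; omega)
    · simp only [hp] at hf
      have hxlo : lo < key x := by
        have h1x := h1 x (by simp)
        have : ¬ key x = lo := fun he => hp ((h2 x (by simp)).mpr he)
        omega
      exact pvFoldl_first key p lo c₀ t x (fun y hy => h1 y (by simp [hy]))
        (fun y hy => h2 y (by simp [hy])) hxlo hf

theorem pvMin?_congr (k1 k2 : String → Int) (xs : List String)
    (h : ∀ x ∈ xs, k1 x = k2 x) : PySem.List.min? xs k1 = PySem.List.min? xs k2 := by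
  rw [pvMin?_eq_foldl, pvMin?_eq_foldl]
  have aux : ∀ (ys : List String) (acc : Option String), (∀ x ∈ ys, k1 x = k2 x) →
      (∀ m, acc = some m → k1 m = k2 m) → ys.foldl (pvStep k1) acc = ys.foldl (pvStep k2) acc := by
    intro ys
    induction ys with
    | nil => intro acc _ _; rfl
    | cons x t ih =>
      intro acc hy hacc
      simp only [List.foldl_cons]
      have hx := hy x (by simp)
      have hstep1 : pvStep k1 acc x = pvStep k2 acc x := by
        cases acc with
        | none => rfl
        | some a => simp [pvStep, hx, hacc a rfl]
      have hstep2 : ∀ m, pvStep k2 acc x = some m → k1 m = k2 m := by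
        intro m hm
        cases acc with
        | none => simp [pvStep] at hm; subst hm; exact hx
        | some a =>
          have ha := hacc a rfl
          simp only [pvStep] at hm
          by_cases hc : k2 x < k2 a <;> simp [hc] at hm <;> subst hm
          · exact hx
          · exact ha
      rw [hstep1]
      exact ih _ (fun y hy' => hy y (by simp [hy'])) hstep2
  exact aux xs none h (by simp)

theorem pvMin?_const (key : String → Int) (k0 : Int) (xs : List String)
    (h : ∀ x ∈ xs, key x = k0) : PySem.List.min? xs key = xs.head? := by
  rw [pvMin?_eq_foldl]
  cases xs with
  | nil => rfl
  | cons x t =>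
    simp only [List.foldl_cons, pvStep, List.head?_cons]
    exact pvFoldl_stay key t x (fun y hy => by
      have h1 := h y (by simp [hy]); have h2 := h x (by simp); omega)

theorem pvMain (toks : List String) (s : Int) (cols : List String) :
    PySem.List.minD cols (pvKeyG toks s) "value" =
      match toks.findSome? (fun t => cols.find? (fun c => PySem.Str.isIn t (PySem.Str.lower c))) with
      | some c => c
      | none => cols.headD "value" := by
  induction toks generalizing s with
  | nil =>
    simp only [List.findSome?_nil]
    unfold PySem.List.minD
    rw [pvMin?_const (pvKeyG [] s) s cols (fun c _ => by
      simp [pvKeyG, PySem.List.enumerate_nil])]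
    cases cols <;> rfl
  | cons t ts ih =>
    rw [List.findSome?_cons]
    cases hf : cols.find? (fun c => PySem.Str.isIn t (PySem.Str.lower c)) with
    | some c₀ =>
      have h1 : ∀ y ∈ cols, s ≤ pvKeyG (t :: ts) s y := by
        intro y _
        rw [pvKeyG_cons]
        by_cases hm : PySem.Str.isIn t (PySem.Str.lower y) = true
        · rw [if_pos hm]
        · rw [if_neg hm]
          have := pvKeyG_lb ts (s + 1) y
          omega
      have h2 : ∀ y ∈ cols, (PySem.Str.isIn t (PySem.Str.lower y)) = true ↔ pvKeyG (t :: ts) s y = s := by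
        intro y _
        rw [pvKeyG_cons]
        by_cases hm : PySem.Str.isIn t (PySem.Str.lower y) = true
        · rw [if_pos hm]; exact ⟨fun _ => rfl, fun _ => hm⟩
        · rw [if_neg hm]
          have := pvKeyG_lb ts (s + 1) y
          constructor
          · intro h; exact absurd h hm
          · intro h; omega
      unfold PySem.List.minD
      rw [pvMin?_first (pvKeyG (t :: ts) s) (fun c => PySem.Str.isIn t (PySem.Str.lower c)) s c₀ cols h1 h2 hf]
      rfl
    | none =>
      have hnone := List.find?_eq_none.mp hf
      unfold PySem.List.minD
      rw [pvMin?_congr (pvKeyG (t :: ts) s) (pvKeyG ts (s + 1)) cols (fun c hc => by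
        rw [pvKeyG_cons, if_neg (by simpa using hnone c hc)])]
      exact ih (s + 1)

-- ===== VERDICT (by name: the statement is the Claim_ definition above) =====
theorem choose_preferred_metric_spec : Claim_equal_choose_preferred_metric := by
  intro cols _
  unfold Spec_choose_preferred_metric choose_preferred_metric choose_preferred_metric_alt
  rw [show PySem.List.minD cols pvKey "value" = PySem.List.minD cols (pvKeyG pvTokens 0) "value" from by
    unfold PySem.List.minD
    rw [pvMin?_congr _ _ _ (fun c _ => pvKey_eq_keyG c)]]
  rw [pvMain]
  cases h : pvTokens.findSome? (fun t => cols.find? (fun c => PySem.Str.isIn t (PySem.Str.lower c))) with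
  | some c => rfl
  | none => cases cols <;> rfl
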